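-- pv_equiv track=rewrite | github.com/ftakanashi/JobProjects | JZOffer/JZII114.外星文字典/main.py | dumpWords
-- ===== SOURCE A (Python) =====
-- def dumpWords(graph, word1, word2):
--     '''
--     对比词对。顺便返回一个bool量。
--     进入此方法时我们保证于原词表中，word1在word2前面。
--     当通过比对发现word1比word2的字典序更靠后时（比如word2是word1前缀的情况等）就返回False，否则返回True
--     '''
--     i = j = 0
--     flag = False
--     while i < len(word1) and j < len(word2):
--         ch1, ch2 = word1[i], word2[j]
--         if ch1 not in graph: graph[ch1] = set()
--         if ch2 not in graph: graph[ch2] = set()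
--         if ch1 != ch2:
--             if ch1 not in graph: graph[ch1] = set()
--             graph[ch1].add(ch2)
--             flag = True
--             break
--
--         i += 1
--         j += 1
--
--     # 此时虽然已经得到了某两个字母的前后关系，但是为了图的完整性要将两个单词中剩余字母也都放入图内
--     while i < len(word1):
--         if word1[i] not in graph: graph[word1[i]] = set()
--         i += 1
--     while j < len(word2):
--         if word2[j] not in graph: graph[word2[j]] = set()
--         j += 1
--
--     return flag or len(word1) <= len(word2)
-- ===== SOURCE B (Python) =====
-- def _lcp(w1, w2):
--     # recursive longest-common-prefix length
--     if w1 and w2 and w1[0] == w2[0]: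
--         return 1 + _lcp(w1[1:], w2[1:])
--     return 0
--
-- def dumpWords(graph, word1, word2):
--     # Register every character of both words as a node, in A's encounter order.
--     for ch in word1 + word2:
--         if ch not in graph:
--             graph[ch] = set()
--     # Reduce the comparison to the longest common prefix: a mismatch exists
--     # exactly when the LCP is shorter than both words.
--     k = _lcp(word1, word2)
--     if k < len(word1) and k < len(word2):
--         graph[word1[k]].add(word2[k])
--         return True
--     return len(word1) <= len(word2)
-- ===== Notes on version B (the rewrite author's own statement) =====
-- stated objective: alternative
-- what changed: B computes the longest-common-prefix length with a recursive helper and derives both the edge (word1[k] -> word2[k] when k is below both lengths) and the boolean verdict from that single number, replacing A's index-based while loop with break flag and two per-index cleanup loops; node registration is one membership-checked pass over word1+word2.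
import Mathlib
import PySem

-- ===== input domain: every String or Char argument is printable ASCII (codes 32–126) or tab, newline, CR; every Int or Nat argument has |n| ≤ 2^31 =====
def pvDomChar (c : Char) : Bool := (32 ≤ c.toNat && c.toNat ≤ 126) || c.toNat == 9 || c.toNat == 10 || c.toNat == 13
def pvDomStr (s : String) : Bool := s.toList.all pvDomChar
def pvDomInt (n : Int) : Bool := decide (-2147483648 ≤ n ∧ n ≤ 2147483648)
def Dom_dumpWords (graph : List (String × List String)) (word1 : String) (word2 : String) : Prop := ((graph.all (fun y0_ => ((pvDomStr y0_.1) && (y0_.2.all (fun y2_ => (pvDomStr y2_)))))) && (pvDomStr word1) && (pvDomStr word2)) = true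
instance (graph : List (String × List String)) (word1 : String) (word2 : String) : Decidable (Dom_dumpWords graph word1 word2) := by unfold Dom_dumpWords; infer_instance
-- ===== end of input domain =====

-- Both Pythons mutate `graph` in place (node/edge insertion; same final contents, possibly
-- different dict key order); the equivalence proved here is about the RETURN value only,
-- so the ports compute the Bool result and omit the graph mutation.
-- B derives edge and verdict from a recursively computed longest-common-prefix length
-- instead of A's break-flag while loop with cleanup loops (objective: alternative).

-- ===== PORT A =====
-- A's first while loop: i, j counters, breaks with flag = True at the first mismatch
-- (the `graph` statements inside it only mutate the dict and never affect the flag).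
def dumpWordsLoop (w1 w2 : List Char) (i j : Nat) : Bool :=
  if h : i < w1.length ∧ j < w2.length then
    if w1[i] ≠ w2[j] then true
    else dumpWordsLoop w1 w2 (i + 1) (j + 1)
  else false
termination_by w1.length - i

def dumpWords (_graph : List (String × List String)) (word1 : String) (word2 : String) : Bool :=
  let w1 := word1.toList
  let w2 := word2.toList
  let flag := dumpWordsLoop w1 w2 0 0
  -- A's two remaining while loops only mutate `graph`; then `return flag or len(word1) <= len(word2)`
  flag || decide (w1.length ≤ w2.length)

-- ===== PORT B =====
-- Source B's _lcp: recursive longest-common-prefix length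
def lcpLen : List Char → List Char → Nat
  | a :: as, b :: bs => if a = b then 1 + lcpLen as bs else 0
  | _, _ => 0

def dumpWords_alt (_graph : List (String × List String)) (word1 : String) (word2 : String) : Bool :=
  -- the registration loop only mutates `graph`; then k = _lcp(word1, word2)
  let w1 := word1.toList
  let w2 := word2.toList
  let k := lcpLen w1 w2
  if k < w1.length ∧ k < w2.length then true  -- graph[word1[k]].add(word2[k]); return True
  else decide (w1.length ≤ w2.length)

-- ===== PRECONDITION & SPEC =====
def Spec_dumpWords (graph : List (String × List String)) (word1 : String) (word2 : String) (out : Bool) : Prop := out = dumpWords_alt graph word1 word2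
instance (graph : List (String × List String)) (word1 : String) (word2 : String) (out : Bool) : Decidable (Spec_dumpWords graph word1 word2 out) := by unfold Spec_dumpWords; infer_instance

-- ===== CLAIM (what is proved, stated in full; the proofs are below) =====
def Claim_equal_dumpWords : Prop := ∀ (graph : List (String × List String)) (word1 : String) (word2 : String), Dom_dumpWords graph word1 word2 → Spec_dumpWords graph word1 word2 (dumpWords graph word1 word2)

-- ===== LEMMAS AND PROOFS =====

-- A's while loop returns true iff the zipped tails contain a mismatching pair.
theorem dumpWordsLoop_eq_find (w1 w2 : List Char) (i j : Nat) :
    dumpWordsLoop w1 w2 i j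
      = (((w1.drop i).zip (w2.drop j)).find? (fun p => p.1 ≠ p.2)).isSome := by
  fun_induction dumpWordsLoop w1 w2 i j with
  | case1 i j h hne =>
      rw [List.drop_eq_getElem_cons h.1, List.drop_eq_getElem_cons h.2]
      simp only [List.zip_cons_cons]
      rw [List.find?_cons_of_pos (by simp [hne])]
      rfl
  | case2 i j h hne ih =>
      rw [List.drop_eq_getElem_cons h.1, List.drop_eq_getElem_cons h.2]
      simp only [List.zip_cons_cons, List.find?]
      simp only [ne_eq, hne, decide_false]
      exact ih
  | case3 i j h =>
      rcases Nat.lt_or_ge i w1.length with h1 | h1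
      · have h2 : w2.length ≤ j := by omega
        simp [List.drop_eq_nil_of_le h2]
      · simp [List.drop_eq_nil_of_le h1]

-- A mismatching pair exists in the zip iff the LCP length is below both lengths.
theorem find_isSome_eq_lcp : ∀ (w1 w2 : List Char),
    ((w1.zip w2).find? (fun p => p.1 ≠ p.2)).isSome
      = decide (lcpLen w1 w2 < w1.length ∧ lcpLen w1 w2 < w2.length)
  | [], _ => by simp [lcpLen]
  | _ :: _, [] => by simp [lcpLen]
  | a :: as, b :: bs => by
      by_cases hab : a = b
      · subst hab
        simp only [List.zip_cons_cons, List.find?, ne_eq, not_true_eq_false, decide_false,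
          lcpLen, reduceIte, List.length_cons]
        rw [find_isSome_eq_lcp as bs]
        by_cases h : lcpLen as bs < as.length ∧ lcpLen as bs < bs.length
        · rw [decide_eq_true h, decide_eq_true (by omega)]
        · rw [decide_eq_false h, decide_eq_false (by omega)]
      · simp [lcpLen, hab, List.find?_cons_of_pos]

-- ===== VERDICT (by name: the statement is the Claim_ definition above) =====
theorem dumpWords_spec : Claim_equal_dumpWords := by
  intro graph word1 word2 _
  unfold Spec_dumpWords dumpWords dumpWords_alt
  simp only [dumpWordsLoop_eq_find, List.drop_zero, find_isSome_eq_lcp]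
  split <;> simp_all
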